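-- pv_equiv track=rewrite | github.com/ezosa/Diachronic-Embeddings | clustering.py | make_json
-- ===== SOURCE A (Python) =====
-- from collections import defaultdict
--
-- def make_json(word_list, counts, labels, centers):
--     # 1 most frequent
--     outlist = []
--     # 2 most frequent
--     outlist2 = []
--     # most freq + centroid
--     outlist_cf = []
--
--     cluster = defaultdict(list)
--     center = {}
--     for i in range(len(labels)):
--         if i in centers:
--             center[labels[i]] = word_list[i]
--         cluster[labels[i]].append(word_list[i])
--
--     for c in sorted(cluster, key = lambda x: len(cluster[x]), reverse=True):
--         cl = cluster[c]
--         words = {w:count for w,count in counts.items() if w in cl}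
--         res = [w for w in sorted(words, key=words.get, reverse=True)]
--         if len(res) > 2:
--             res2 = [res[0]+"_"+res[1]] + res[2:]
--             res_noc = [r for r in res if r != center[c]]
--             res_cf = [center[c] + "_" + res_noc[0]] + res_noc[2:]
--         elif len(res) == 2:
--             res2 = res_cf = [res[0] + "_" + res[1]]
--         else:
--             res2 = res_cf = res
--
--
--         outlist.append(res)
--         outlist2.append(res2)
--         outlist_cf.append(res_cf)
--
--     return outlist, outlist2, outlist_cf
-- ===== SOURCE B (Python) =====
-- def make_json(word_list, counts, labels, centers):
--     # One pass builds cluster lists, centroid words and an inverted index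
--     # word -> labels; counts is then distributed to clusters in a single
--     # sweep instead of scanning every cluster for every count entry.
--     centers_set = set(centers)
--     cluster = {}
--     center = {}
--     word_labels = {}
--     for i, (lab, w) in enumerate(zip(labels, word_list)):
--         cluster.setdefault(lab, []).append(w)
--         if i in centers_set:
--             center[lab] = w
--         word_labels.setdefault(w, {})[lab] = None
--
--     buckets = {}
--     for w, cnt in counts.items():
--         for lab in word_labels.get(w, ()):
--             buckets.setdefault(lab, []).append((w, cnt))
--
--     outlist, outlist2, outlist_cf = [], [], []
--     for lab in sorted(cluster, key=lambda l: len(cluster[l]), reverse=True):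
--         pairs = sorted(buckets.get(lab, []), key=lambda t: t[1], reverse=True)
--         res = [w for w, _ in pairs]
--         res2, res_cf = _format_labels(res, center[lab] if len(res) > 2 else "")
--         outlist.append(res)
--         outlist2.append(res2)
--         outlist_cf.append(res_cf)
--     return outlist, outlist2, outlist_cf
--
--
-- def _format_labels(res, cen):
--     if len(res) <= 1:
--         return res, res
--     first, second, *rest = res
--     if not rest:
--         two = [first + "_" + second]
--         return two, two
--     noc = [r for r in res if r != cen]
--     return [first + "_" + second] + rest, [cen + "_" + noc[0]] + noc[2:]
-- ===== Notes on version B (the rewrite author's own statement) =====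
-- stated objective: faster
-- what changed: Instead of re-scanning all counts with a linear 'w in cl' membership test for every cluster (O(K*N*|cl|)), B builds in one pass an inverted index word->labels plus the cluster and center dicts, distributes counts.items() to per-cluster buckets in a single sweep, and then only sorts each bucket; label formatting moves to a helper using tuple unpacking.
import Mathlib
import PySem

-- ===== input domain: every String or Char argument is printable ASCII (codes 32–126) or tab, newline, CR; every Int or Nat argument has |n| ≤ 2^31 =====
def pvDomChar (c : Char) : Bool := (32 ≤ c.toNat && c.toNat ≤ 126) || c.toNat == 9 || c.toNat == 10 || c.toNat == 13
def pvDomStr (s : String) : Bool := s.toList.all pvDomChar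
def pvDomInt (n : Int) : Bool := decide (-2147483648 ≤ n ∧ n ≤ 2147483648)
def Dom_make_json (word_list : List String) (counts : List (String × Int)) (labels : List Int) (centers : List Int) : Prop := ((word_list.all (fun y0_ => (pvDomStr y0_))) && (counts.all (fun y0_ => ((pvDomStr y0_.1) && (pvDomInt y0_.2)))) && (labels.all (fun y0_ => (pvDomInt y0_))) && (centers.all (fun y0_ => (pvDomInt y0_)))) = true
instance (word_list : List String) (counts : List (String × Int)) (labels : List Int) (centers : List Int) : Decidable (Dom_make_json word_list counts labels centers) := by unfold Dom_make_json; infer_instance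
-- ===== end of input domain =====

-- B replaces A's per-cluster rescans of counts (with a linear 'w in cl' test) by a one-pass
-- inverted index word → labels that distributes counts to per-cluster buckets in a single sweep.

-- ===== PORT A =====
def make_json (word_list : List String) (counts : List (String × Int)) (labels : List Int) (centers : List Int) : List (List String) × List (List String) × List (List String) :=
  -- cluster = defaultdict(list); center = {}; for i in range(len(labels)): …
  let st := (PySem.List.pyRange 0 (PySem.List.len labels) 1).foldl
    (fun (st : PySem.Dict Int (List String) × PySem.Dict Int String) i =>
      ( (fun (d : PySem.Dict Int (List String)) (i : Int) =>
          d.modify (PySem.List.pyGetD labels i 0) [] (fun l => l ++ [PySem.List.pyGetD word_list i ""])) st.1 i,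
        (fun (d : PySem.Dict Int String) (i : Int) =>
          if i ∈ centers then d.insert (PySem.List.pyGetD labels i 0) (PySem.List.pyGetD word_list i "") else d) st.2 i))
    (PySem.Dict.empty, PySem.Dict.empty)
  let cluster := st.1
  let center := st.2
  -- for c in sorted(cluster, key=lambda x: len(cluster[x]), reverse=True): …
  (PySem.List.sorted cluster.keys (fun c => (cluster.getD c []).length) true).foldl
    (fun (acc : List (List String) × List (List String) × List (List String)) c =>
      let cl := cluster.getD c []
      let words := counts.foldl
        (fun (d : PySem.Dict String Int) p => if p.1 ∈ cl then d.insert p.1 p.2 else d) PySem.Dict.empty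
      let res := PySem.List.sorted words.keys (fun w => words.getD w 0) true
      let r :=
        if 2 < res.length then
          -- center[c] raises KeyError when c has no centroid: excluded by Pre_ (getD "" is the total form)
          let res2 := [PySem.List.pyGetD res 0 "" ++ "_" ++ PySem.List.pyGetD res 1 ""] ++ PySem.List.slice res (some 2) none
          let res_noc := res.filter (fun r => r != center.getD c "")
          let res_cf := [center.getD c "" ++ "_" ++ PySem.List.pyGetD res_noc 0 ""] ++ PySem.List.slice res_noc (some 2) none
          (res2, res_cf)
        else if res.length == 2 then
          let r2 := [PySem.List.pyGetD res 0 "" ++ "_" ++ PySem.List.pyGetD res 1 ""]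
          (r2, r2)
        else (res, res)
      (acc.1 ++ [res], acc.2.1 ++ [r.1], acc.2.2 ++ [r.2]))
    ([], [], [])

-- ===== PORT B =====
-- Source B's _format_labels: tuple unpacking; total where Source B would raise (excluded by Pre_)
def formatLabels (res : List String) (cen : String) : List String × List String :=
  match res with
  | [] => (res, res)
  | [_] => (res, res)
  | first :: second :: rest =>
    if rest.isEmpty then
      let two := [first ++ "_" ++ second]
      (two, two)
    else
      let noc := res.filter (fun r => r != cen)
      ((first ++ "_" ++ second) :: rest,
       match noc with
       | [] => []   -- Source B raises IndexError here; unreachable on dict-shaped counts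
       | n0 :: ntail => (cen ++ "_" ++ n0) :: ntail.drop 1)

def make_json_alt (word_list : List String) (counts : List (String × Int)) (labels : List Int) (centers : List Int) : List (List String) × List (List String) × List (List String) :=
  let centers_set := PySem.Set.ofList centers
  -- one pass over enumerate(zip(labels, word_list)) builds cluster, center and the inverted index
  let st := (PySem.List.enumerate (labels.zip word_list)).foldl
    (fun (st : PySem.Dict Int (List String) × PySem.Dict Int String × PySem.Dict String (PySem.Set Int)) e =>
      ( (fun (d : PySem.Dict Int (List String)) (e : Int × Int × String) =>
          d.modify e.2.1 [] (fun l => l ++ [e.2.2])) st.1 e,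
        (fun (st2 : PySem.Dict Int String × PySem.Dict String (PySem.Set Int)) (e : Int × Int × String) =>
          ( (fun (d : PySem.Dict Int String) (e : Int × Int × String) =>
              if e.1 ∈ centers_set then d.insert e.2.1 e.2.2 else d) st2.1 e,
            (fun (d : PySem.Dict String (PySem.Set Int)) (e : Int × Int × String) =>
              d.modify e.2.2 PySem.Set.empty (fun s => s.add e.2.1)) st2.2 e)) st.2 e))
    (PySem.Dict.empty, PySem.Dict.empty, PySem.Dict.empty)
  let cluster := st.1
  let center := st.2.1
  let word_labels := st.2.2
  -- distribute counts.items() to per-cluster buckets in one sweep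
  let buckets := counts.foldl
    (fun (b : PySem.Dict Int (List (String × Int))) p =>
      (word_labels.getD p.1 PySem.Set.empty).foldl
        (fun (b : PySem.Dict Int (List (String × Int))) lab => b.modify lab [] (fun l => l ++ [p])) b)
    PySem.Dict.empty
  (PySem.List.sorted cluster.keys (fun l => (cluster.getD l []).length) true).foldl
    (fun (acc : List (List String) × List (List String) × List (List String)) lab =>
      let pairs := PySem.List.sorted (buckets.getD lab []) (fun t => t.2) true
      let res := pairs.map (fun t => t.1)
      let r := formatLabels res (if 2 < res.length then center.getD lab "" else "")
      (acc.1 ++ [res], acc.2.1 ++ [r.1], acc.2.2 ++ [r.2]))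
    ([], [], [])

-- ===== PRECONDITION & SPEC =====
-- words of the cluster labelled c (used only to state Pre_)
def clusterWords (word_list : List String) (labels : List Int) (c : Int) : List String :=
  ((labels.zip word_list).filter (fun q => q.1 == c)).map (fun q => q.2)

-- Pre_ excludes exactly the inputs where the Python A raises: an IndexError when labels is longer
-- than word_list, and a KeyError (center[c]) when some cluster whose words meet more than 2 of
-- counts' keys has no index in centers; the Nodup clause only says counts is a Python dict
-- (an association list with duplicate keys represents no dict argument).
def Pre_make_json (word_list : List String) (counts : List (String × Int)) (labels : List Int) (centers : List Int) : Prop :=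
  labels.length ≤ word_list.length ∧
  (counts.map Prod.fst).Nodup ∧
  ∀ c ∈ labels,
    2 < (counts.filter (fun p => (clusterWords word_list labels c).contains p.1)).length →
    ∃ i ∈ List.range labels.length, (i : Int) ∈ centers ∧ labels.getD i 0 = c
instance (word_list : List String) (counts : List (String × Int)) (labels : List Int) (centers : List Int) : Decidable (Pre_make_json word_list counts labels centers) := by unfold Pre_make_json; infer_instance

def pvWitness_make_json : List String × (List (String × Int)) × List Int × List Int :=
  (["a", "b", "c"], [("a", 2), ("b", 1), ("c", 3)], [0, 0, 0], [1])

def Spec_make_json (word_list : List String) (counts : List (String × Int)) (labels : List Int) (centers : List Int) (out : List (List String) × List (List String) × List (List String)) : Prop := out = make_json_alt word_list counts labels centers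
instance (word_list : List String) (counts : List (String × Int)) (labels : List Int) (centers : List Int) (out : List (List String) × List (List String) × List (List String)) : Decidable (Spec_make_json word_list counts labels centers out) := by unfold Spec_make_json; infer_instance

-- ===== CLAIM (what is proved, stated in full; the proofs are below) =====
def Claim_equal_make_json : Prop := ∀ (word_list : List String) (counts : List (String × Int)) (labels : List Int) (centers : List Int), Dom_make_json word_list counts labels centers → Pre_make_json word_list counts labels centers → Spec_make_json word_list counts labels centers (make_json word_list counts labels centers)

-- ===== LEMMAS AND PROOFS =====

-- proof-only middle form both ports are reduced to
def canonMJ (word_list : List String) (counts : List (String × Int)) (labels : List Int) (centers : List Int) : List (List String) × List (List String) × List (List String) :=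
  let Z := labels.zip word_list
  let cluster := Z.foldl (fun (d : PySem.Dict Int (List String)) q => d.modify q.1 [] (fun l => l ++ [q.2])) PySem.Dict.empty
  let center := (PySem.List.enumerate Z).foldl
    (fun (d : PySem.Dict Int String) e => if e.1 ∈ centers then d.insert e.2.1 e.2.2 else d) PySem.Dict.empty
  (PySem.List.sorted cluster.keys (fun c => (cluster.getD c []).length) true).foldl
    (fun (acc : List (List String) × List (List String) × List (List String)) c =>
      let F := counts.filter (fun p => decide (p.1 ∈ cluster.getD c []))
      let res := (PySem.List.sorted F (fun t => t.2) true).map (fun t => t.1)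
      let r := formatLabels res (if 2 < res.length then center.getD c "" else "")
      (acc.1 ++ [res], acc.2.1 ++ [r.1], acc.2.2 ++ [r.2]))
    ([], [], [])

-- generic: a fold guarded by an if is a fold over the filtered list
theorem foldl_ite_filter {a b : Type} (P : a -> Prop) [DecidablePred P] (f : b -> a -> b) :
    ∀ (l : List a) (init : b),
      l.foldl (fun acc x => if P x then f acc x else acc) init
        = (l.filter (fun x => decide (P x))).foldl f init := by
  intro l
  induction l with
  | nil => intro init; rfl
  | cons x t ih =>
    intro init
    by_cases h : P x <;> simp [h, ih]

-- first-match lookup in a list with distinct keys finds the pair itself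
theorem find?_of_mem_nodup {k v : Type} [BEq k] [LawfulBEq k] :
    ∀ (l : List (k × v)) (p : k × v), p ∈ l -> (l.map Prod.fst).Nodup ->
      l.find? (fun q => q.1 == p.1) = some p := by
  intro l
  induction l with
  | nil => intro p hp _; cases hp
  | cons a t ih =>
    intro p hp hnd
    simp only [List.map_cons, List.nodup_cons] at hnd
    rcases List.mem_cons.mp hp with rfl | hp'
    · simp
    · have hne : (a.1 == p.1) = false := by
        have hmem : p.1 ∈ t.map Prod.fst := List.mem_map_of_mem hp'
        simp only [beq_eq_false_iff_ne, ne_eq]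
        intro h; exact hnd.1 (h ▸ hmem)
      rw [List.find?_cons_of_neg (by simp [hne])]
      exact ih p hp' hnd.2

theorem getD_of_mem_items {k v : Type} [BEq k] [LawfulBEq k]
    (d : PySem.Dict k v) (p : k × v) (dflt : v)
    (hp : p ∈ d.items) (hnd : (d.items.map Prod.fst).Nodup) :
    d.getD p.1 dflt = p.2 := by
  simp [PySem.Dict.getD, PySem.Dict.get?, find?_of_mem_nodup d.items p hp hnd]

-- stable descending sort commutes with projecting the keys out of the pairs
theorem insertBy_map_fst (keyf : String -> Int) (p : String × Int) :
    ∀ (acc : List (String × Int)),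
      keyf p.1 = p.2 -> (∀ q ∈ acc, keyf q.1 = q.2) ->
      PySem.List.insertBy (fun a b => decide (keyf b < keyf a)) p.1 (acc.map Prod.fst)
        = (PySem.List.insertBy (fun a b => decide (b.2 < a.2)) p acc).map Prod.fst := by
  intro acc
  induction acc with
  | nil => intro _ _; simp [PySem.List.insertBy]
  | cons q t ih =>
    intro hp hacc
    have hq := hacc q (by simp)
    have hcond : (decide (q.2 < p.2)) = (decide (keyf q.1 < keyf p.1)) := by rw [← hp, ← hq]
    by_cases hlt : keyf q.1 < keyf p.1
    · simp [PySem.List.insertBy, hlt, hcond]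
    · simp [PySem.List.insertBy, hlt, hcond,
        ih hp (fun r hr => hacc r (List.mem_cons_of_mem q hr))]

theorem foldl_insertBy_map_fst (keyf : String -> Int) :
    ∀ (F acc : List (String × Int)),
      (∀ q ∈ F, keyf q.1 = q.2) -> (∀ q ∈ acc, keyf q.1 = q.2) ->
      F.foldl (fun a x => PySem.List.insertBy (fun a b => decide (keyf b < keyf a)) x.1 a) (acc.map Prod.fst)
        = (F.foldl (fun a x => PySem.List.insertBy (fun a b => decide (b.2 < a.2)) x a) acc).map Prod.fst := by
  intro F
  induction F with
  | nil => intro acc _ _; simp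
  | cons x t ih =>
    intro acc hF hacc
    simp only [List.foldl_cons]
    rw [insertBy_map_fst keyf x acc (hF x (by simp)) hacc]
    exact ih _ (fun q hq => hF q (List.mem_cons_of_mem x hq))
      (fun q hq => by
        rcases (PySem.List.mem_insertBy _ _ _ _).mp hq with rfl | h
        · exact hF q (by simp)
        · exact hacc q h)

theorem sorted_rev_map_fst (keyf : String -> Int) (F : List (String × Int))
    (h : ∀ q ∈ F, keyf q.1 = q.2) :
    PySem.List.sorted (F.map Prod.fst) keyf true
      = (PySem.List.sorted F (fun t => t.2) true).map Prod.fst := by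
  rw [PySem.List.sorted_rev_eq_foldl_insertBy, PySem.List.sorted_rev_eq_foldl_insertBy, List.foldl_map]
  have := foldl_insertBy_map_fst keyf F [] h (by simp)
  simpa using this

-- indexing into the zip under the length hypothesis
theorem zip_pyGetD (labels : List Int) (word_list : List String)
    (h : labels.length ≤ word_list.length) (i : Int) (h0 : 0 ≤ i) (hi : i < (labels.length : Int)) :
    PySem.List.pyGetD (labels.zip word_list) i ((0 : Int), "")
      = (PySem.List.pyGetD labels i 0, PySem.List.pyGetD word_list i "") := by
  have hzlen : (labels.zip word_list).length = labels.length := by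
    simp [List.length_zip]; omega
  have h1 : i < ((labels.zip word_list).length : Int) := by rw [hzlen]; exact hi
  have h2 : i < ((word_list.length : Int)) := by
    have : (labels.length : Int) ≤ (word_list.length : Int) := by exact_mod_cast h
    omega
  rw [PySem.List.pyGetD_eq_getElem _ _ h0 h1,
      PySem.List.pyGetD_eq_getElem _ _ h0 hi,
      PySem.List.pyGetD_eq_getElem _ _ h0 h2]
  simp [List.getElem_zip]

-- the index loop over range(len(labels)) is the loop over enumerate(zip(labels, word_list))
theorem foldl_pyRange_zip {s : Type} (labels : List Int) (word_list : List String)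
    (h : labels.length ≤ word_list.length) (f : s -> Int -> Int -> String -> s) (init : s) :
    (PySem.List.pyRange 0 (PySem.List.len labels) 1).foldl
        (fun st i => f st i (PySem.List.pyGetD labels i 0) (PySem.List.pyGetD word_list i "")) init
      = (PySem.List.enumerate (labels.zip word_list)).foldl (fun st e => f st e.1 e.2.1 e.2.2) init := by
  have hzlen : (labels.zip word_list).length = labels.length := by
    simp [List.length_zip]; omega
  rw [PySem.List.enumerate_eq_map_pyRange _ ((0 : Int), ""), List.foldl_map]
  simp only [PySem.List.len_eq, hzlen]
  apply PySem.List.foldl_congr_mem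
  intro acc i hi
  rcases PySem.List.mem_pyRange_one.mp hi with ⟨h0, hlt⟩
  rw [zip_pyGetD labels word_list h i h0 hlt]

-- a fold over enumerate whose body ignores the index is the fold over the list
theorem foldl_enumerate_snd {a s : Type} (f : s -> a -> s) :
    ∀ (l : List a) (st : Int) (init : s),
      (PySem.List.enumerate l st).foldl (fun acc e => f acc e.2) init = l.foldl f init := by
  intro l
  induction l with
  | nil => intro st init; simp [PySem.List.enumerate_nil]
  | cons x t ih => intro st init; simp [PySem.List.enumerate_cons, ih]

-- word_labels invariants
theorem wl_getD_nodup (Z : List (Int × String)) :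
    ∀ (d : PySem.Dict String (PySem.Set Int)),
      (∀ w, (d.getD w PySem.Set.empty).Nodup) ->
      ∀ w, ((Z.foldl (fun d q => d.modify q.2 PySem.Set.empty (fun s => s.add q.1)) d).getD w PySem.Set.empty).Nodup := by
  induction Z with
  | nil => intro d hd w; exact hd w
  | cons q t ih =>
    intro d hd w
    refine ih _ ?_ w
    intro w'
    by_cases hw : w' = q.2
    · subst hw; rw [PySem.Dict.getD_modify_self]; exact PySem.Set.nodup_add _ _ (hd _)
    · rw [PySem.Dict.getD_modify_of_ne _ _ _ hw]; exact hd w'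

theorem wl_getD_mem (Z : List (Int × String)) :
    ∀ (d : PySem.Dict String (PySem.Set Int)) (w : String) (lab : Int),
      (lab ∈ (Z.foldl (fun d q => d.modify q.2 PySem.Set.empty (fun s => s.add q.1)) d).getD w PySem.Set.empty
        ↔ lab ∈ d.getD w PySem.Set.empty ∨ ∃ q ∈ Z, q.2 = w ∧ q.1 = lab) := by
  induction Z with
  | nil => intro d w lab; simp
  | cons q t ih =>
    intro d w lab
    rw [List.foldl_cons, ih]
    have hstep : lab ∈ (d.modify q.2 PySem.Set.empty (fun s => s.add q.1)).getD w PySem.Set.empty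
        ↔ lab ∈ d.getD w PySem.Set.empty ∨ (q.2 = w ∧ q.1 = lab) := by
      by_cases hw : w = q.2
      · subst hw; rw [PySem.Dict.getD_modify_self, PySem.Set.mem_add]; tauto
      · rw [PySem.Dict.getD_modify_of_ne _ _ _ hw]
        constructor
        · tauto
        · rintro (hm | ⟨h1, _⟩)
          · exact hm
          · exact absurd h1.symm hw
    rw [hstep]
    simp only [List.mem_cons]
    constructor
    · rintro ((hm | ⟨h1, h2⟩) | ⟨q', hq', h1, h2⟩)
      · exact Or.inl hm
      · exact Or.inr ⟨q, Or.inl rfl, h1, h2⟩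
      · exact Or.inr ⟨q', Or.inr hq', h1, h2⟩
    · rintro (hm | ⟨q', (rfl | hq'), h1, h2⟩)
      · exact Or.inl (Or.inl hm)
      · exact Or.inl (Or.inr ⟨h1, h2⟩)
      · exact Or.inr ⟨q', hq', h1, h2⟩

-- distributing one counts entry over a Nodup label list appends it to exactly those buckets
theorem bucket_inner (p : String × Int) :
    ∀ (ks : List Int) (b : PySem.Dict Int (List (String × Int))) (c : Int), ks.Nodup ->
      ((ks.foldl (fun b lab => b.modify lab [] (fun l => l ++ [p])) b).getD c []
        = b.getD c [] ++ (if c ∈ ks then [p] else [])) := by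
  intro ks
  induction ks with
  | nil => intro b c _; simp
  | cons k t ih =>
    intro b c hnd
    have hnd' := (List.nodup_cons.mp hnd).2
    simp only [List.foldl_cons]
    rw [ih _ c hnd']
    by_cases hc : c = k
    · subst hc
      rw [PySem.Dict.getD_modify_self]
      have hct : c ∉ t := (List.nodup_cons.mp hnd).1
      simp [hct]
    · rw [PySem.Dict.getD_modify_of_ne _ _ _ hc]
      by_cases hct : c ∈ t <;> simp [hc, hct]

theorem bucket_getD (S : String -> PySem.Set Int) (hS : ∀ w, (S w).Nodup) :
    ∀ (l : List (String × Int)) (b : PySem.Dict Int (List (String × Int))) (c : Int),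
      ((l.foldl (fun b p => (S p.1).foldl (fun b lab => b.modify lab [] (fun l => l ++ [p])) b) b).getD c []
        = b.getD c [] ++ l.filter (fun p => decide (c ∈ S p.1))) := by
  intro l
  induction l with
  | nil => intro b c; simp
  | cons p t ih =>
    intro b c
    simp only [List.foldl_cons, List.filter_cons]
    rw [ih, bucket_inner p _ b c (hS p.1)]
    by_cases hc : c ∈ S p.1 <;> simp [hc]

-- formatLabels against A's inline index arithmetic
theorem fmt_small (res : List String) (cen : String) (h : res.length ≤ 1) :
    formatLabels res cen = (res, res) := by
  match res, h with
  | [], _ => rfl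
  | [a], _ => rfl

theorem fmt_two (res : List String) (cen : String) (h : res.length = 2) :
    formatLabels res cen
      = ([PySem.List.pyGetD res 0 "" ++ "_" ++ PySem.List.pyGetD res 1 ""],
         [PySem.List.pyGetD res 0 "" ++ "_" ++ PySem.List.pyGetD res 1 ""]) := by
  match res, h with
  | [a, b], _ => rfl

theorem fmt_big (res : List String) (cen : String) (h2 : 2 < res.length) (hnd : res.Nodup) :
    formatLabels res cen
      = ([PySem.List.pyGetD res 0 "" ++ "_" ++ PySem.List.pyGetD res 1 ""] ++ PySem.List.slice res (some 2) none,
         [cen ++ "_" ++ PySem.List.pyGetD (res.filter (fun r => r != cen)) 0 ""]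
           ++ PySem.List.slice (res.filter (fun r => r != cen)) (some 2) none) := by
  match res, h2, hnd with
  | a :: b :: t0 :: rest, _, hnd =>
    have hab : a ≠ b := by simp [List.nodup_cons] at hnd; tauto
    have hnoc : (a :: b :: t0 :: rest).filter (fun r => r != cen) ≠ [] := by
      by_cases ha : a = cen
      · have hb : (b ∈ (a :: b :: t0 :: rest).filter (fun r => r != cen)) := by
          simp only [List.mem_filter, bne_iff_ne, ne_eq]
          exact ⟨by simp, by rw [← ha]; exact fun h => hab h.symm⟩
        exact List.ne_nil_of_mem hb
      · have hha : (a ∈ (a :: b :: t0 :: rest).filter (fun r => r != cen)) := by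
          simp only [List.mem_filter, bne_iff_ne, ne_eq]
          exact ⟨by simp, ha⟩
        exact List.ne_nil_of_mem hha
    obtain ⟨n0, ntail, hn⟩ := List.exists_cons_of_ne_nil hnoc
    have e1 : PySem.List.pyGetD (a :: b :: t0 :: rest) 1 "" = b := by simp [pysem]
    have e2 : PySem.List.slice (a :: b :: t0 :: rest) (some 2) none = t0 :: rest := by
      rw [PySem.List.slice_from _ (by norm_num)]; simp
    have e4 : PySem.List.slice (n0 :: ntail) (some 2) none = ntail.drop 1 := by
      rw [PySem.List.slice_from _ (by norm_num)]; simp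
    show formatLabels (a :: b :: t0 :: rest) cen = _
    rw [hn, e1, e2, e4, PySem.List.pyGetD_zero_cons, PySem.List.pyGetD_zero_cons]
    simp [formatLabels, hn]

theorem res_eq (counts : List (String × Int)) (hnodup : (counts.map Prod.fst).Nodup) (cl : List String) :
    PySem.List.sorted
        (counts.foldl (fun (d : PySem.Dict String Int) p => if p.1 ∈ cl then d.insert p.1 p.2 else d) PySem.Dict.empty).keys
        (fun w => (counts.foldl (fun (d : PySem.Dict String Int) p => if p.1 ∈ cl then d.insert p.1 p.2 else d) PySem.Dict.empty).getD w 0) true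
      = (PySem.List.sorted (counts.filter (fun p => decide (p.1 ∈ cl))) (fun t => t.2) true).map (fun t => t.1) := by
  rw [foldl_ite_filter (fun p : String × Int => p.1 ∈ cl) (fun (d : PySem.Dict String Int) p => d.insert p.1 p.2) counts PySem.Dict.empty]
  set F := counts.filter (fun p => decide (p.1 ∈ cl)) with hF
  have hFnd : (F.map Prod.fst).Nodup :=
    List.Nodup.sublist (List.Sublist.map _ List.filter_sublist) hnodup
  set D := F.foldl (fun (d : PySem.Dict String Int) p => d.insert p.1 p.2) PySem.Dict.empty with hD
  have hitems : D.items = F := by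
    rw [hD, PySem.Dict.items_foldl_insert_fresh F (fun p => p.1) (fun p => p.2) PySem.Dict.empty
        (fun a _ => PySem.Dict.contains_empty _) hFnd]
    simp [PySem.Dict.empty]
  have hkeys : D.keys = F.map Prod.fst := by
    simp only [PySem.Dict.keys, hitems]
  rw [hkeys, sorted_rev_map_fst (fun w => D.getD w 0) F
      (fun q hq => getD_of_mem_items D q 0 (hitems ▸ hq) (by rw [hitems]; exact hFnd))]

theorem res_nodup (counts : List (String × Int)) (hnodup : (counts.map Prod.fst).Nodup) (cl : List String) :
    ((PySem.List.sorted (counts.filter (fun p => decide (p.1 ∈ cl))) (fun t => t.2) true).map (fun t => t.1)).Nodup := by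
  have hFnd : ((counts.filter (fun p => decide (p.1 ∈ cl))).map (fun t : String × Int => t.1)).Nodup :=
    List.Nodup.sublist (List.Sublist.map _ List.filter_sublist) hnodup
  exact ((PySem.List.sorted_perm _ _ _).map (fun t : String × Int => t.1)).nodup_iff.mpr hFnd

theorem branch_eq (res : List String) (cenv : String) (hnd : res.Nodup) :
    (if 2 < res.length then
        ([PySem.List.pyGetD res 0 "" ++ "_" ++ PySem.List.pyGetD res 1 ""] ++ PySem.List.slice res (some 2) none,
         [cenv ++ "_" ++ PySem.List.pyGetD (res.filter (fun r => r != cenv)) 0 ""]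
           ++ PySem.List.slice (res.filter (fun r => r != cenv)) (some 2) none)
      else if res.length == 2 then
        ([PySem.List.pyGetD res 0 "" ++ "_" ++ PySem.List.pyGetD res 1 ""],
         [PySem.List.pyGetD res 0 "" ++ "_" ++ PySem.List.pyGetD res 1 ""])
      else (res, res))
    = formatLabels res (if 2 < res.length then cenv else "") := by
  by_cases h2 : 2 < res.length
  · rw [if_pos h2, if_pos h2, fmt_big res cenv h2 hnd]
  · rw [if_neg h2, if_neg h2]
    by_cases he : res.length = 2
    · have hb : (res.length == 2) = true := by simpa using he
      rw [if_pos (by simp [hb]), fmt_two res "" he]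
    · have hb : (res.length == 2) = false := by simpa using he
      rw [if_neg (by simp [hb]), fmt_small res "" (by omega)]

theorem a_eq_canon (word_list : List String) (counts : List (String × Int)) (labels : List Int) (centers : List Int)
    (hlen : labels.length ≤ word_list.length) (hnodup : (counts.map Prod.fst).Nodup) :
    make_json word_list counts labels centers = canonMJ word_list counts labels centers := by
  simp only [make_json, canonMJ]
  rw [PySem.List.foldl_prod_mk
        (fun (d : PySem.Dict Int (List String)) (i : Int) =>
          d.modify (PySem.List.pyGetD labels i 0) [] (fun l => l ++ [PySem.List.pyGetD word_list i ""]))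
        (fun (d : PySem.Dict Int String) (i : Int) =>
          if i ∈ centers then d.insert (PySem.List.pyGetD labels i 0) (PySem.List.pyGetD word_list i "") else d)]
  rw [foldl_pyRange_zip labels word_list hlen
        (fun (d : PySem.Dict Int (List String)) (_i : Int) (lab : Int) (w : String) =>
          d.modify lab [] (fun l => l ++ [w])) PySem.Dict.empty]
  rw [foldl_pyRange_zip labels word_list hlen
        (fun (d : PySem.Dict Int String) (i : Int) (lab : Int) (w : String) =>
          if i ∈ centers then d.insert lab w else d) PySem.Dict.empty]
  rw [foldl_enumerate_snd
        (fun (d : PySem.Dict Int (List String)) (q : Int × String) =>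
          d.modify q.1 [] (fun l => l ++ [q.2])) (labels.zip word_list) 0 PySem.Dict.empty]
  set CL := (labels.zip word_list).foldl
      (fun (d : PySem.Dict Int (List String)) q => d.modify q.1 [] (fun l => l ++ [q.2])) PySem.Dict.empty with hCL
  set CEN := (PySem.List.enumerate (labels.zip word_list)).foldl
      (fun (d : PySem.Dict Int String) e => if e.1 ∈ centers then d.insert e.2.1 e.2.2 else d) PySem.Dict.empty with hCEN
  apply PySem.List.foldl_congr_mem
  intro acc c _
  rw [res_eq counts hnodup (CL.getD c [])]
  rw [branch_eq
        ((PySem.List.sorted (counts.filter (fun p => decide (p.1 ∈ CL.getD c []))) (fun t => t.2) true).map (fun t => t.1))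
        (CEN.getD c "") (res_nodup counts hnodup (CL.getD c []))]

theorem b_eq_canon (word_list : List String) (counts : List (String × Int)) (labels : List Int) (centers : List Int) :
    make_json_alt word_list counts labels centers = canonMJ word_list counts labels centers := by
  simp only [make_json_alt, canonMJ]
  rw [PySem.List.foldl_prod_mk
        (fun (d : PySem.Dict Int (List String)) (e : Int × Int × String) =>
          d.modify e.2.1 [] (fun l => l ++ [e.2.2]))
        (fun (st2 : PySem.Dict Int String × PySem.Dict String (PySem.Set Int)) (e : Int × Int × String) =>
          ( (fun (d : PySem.Dict Int String) (e : Int × Int × String) =>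
              if e.1 ∈ PySem.Set.ofList centers then d.insert e.2.1 e.2.2 else d) st2.1 e,
            (fun (d : PySem.Dict String (PySem.Set Int)) (e : Int × Int × String) =>
              d.modify e.2.2 PySem.Set.empty (fun s => s.add e.2.1)) st2.2 e))]
  rw [PySem.List.foldl_prod_mk
        (fun (d : PySem.Dict Int String) (e : Int × Int × String) =>
          if e.1 ∈ PySem.Set.ofList centers then d.insert e.2.1 e.2.2 else d)
        (fun (d : PySem.Dict String (PySem.Set Int)) (e : Int × Int × String) =>
          d.modify e.2.2 PySem.Set.empty (fun s => s.add e.2.1))]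
  rw [foldl_enumerate_snd
        (fun (d : PySem.Dict Int (List String)) (q : Int × String) =>
          d.modify q.1 [] (fun l => l ++ [q.2])) (labels.zip word_list) 0 PySem.Dict.empty]
  rw [foldl_enumerate_snd
        (fun (d : PySem.Dict String (PySem.Set Int)) (q : Int × String) =>
          d.modify q.2 PySem.Set.empty (fun s => s.add q.1)) (labels.zip word_list) 0 PySem.Dict.empty]
  have hcen : (PySem.List.enumerate (labels.zip word_list)).foldl
        (fun (d : PySem.Dict Int String) e => if e.1 ∈ PySem.Set.ofList centers then d.insert e.2.1 e.2.2 else d)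
        PySem.Dict.empty
      = (PySem.List.enumerate (labels.zip word_list)).foldl
        (fun (d : PySem.Dict Int String) e => if e.1 ∈ centers then d.insert e.2.1 e.2.2 else d)
        PySem.Dict.empty := by
    apply PySem.List.foldl_congr_mem
    intro acc e _
    by_cases h : e.1 ∈ centers <;> simp [PySem.Set.mem_ofList, h]
  rw [hcen]
  set CL := (labels.zip word_list).foldl
      (fun (d : PySem.Dict Int (List String)) q => d.modify q.1 [] (fun l => l ++ [q.2])) PySem.Dict.empty with hCL
  set WL := (labels.zip word_list).foldl
      (fun (d : PySem.Dict String (PySem.Set Int)) q => d.modify q.2 PySem.Set.empty (fun s => s.add q.1)) PySem.Dict.empty with hWL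
  have hS : ∀ w, (WL.getD w PySem.Set.empty).Nodup := by
    rw [hWL]
    exact wl_getD_nodup (labels.zip word_list) PySem.Dict.empty
      (by intro w; rw [PySem.Dict.getD_empty]; exact List.nodup_nil)
  have hfc : ∀ c : Int,
      counts.filter (fun p => decide (c ∈ WL.getD p.1 PySem.Set.empty))
        = counts.filter (fun p => decide (p.1 ∈ CL.getD c [])) := by
    intro c
    apply List.filter_congr
    intro p _
    simp only [decide_eq_decide]
    rw [hWL, hCL, wl_getD_mem (labels.zip word_list) PySem.Dict.empty p.1 c,
        PySem.Dict.getD_foldl_modify_append (labels.zip word_list) PySem.Dict.empty c]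
    simp only [PySem.Dict.getD_empty, List.nil_append, List.mem_map, List.mem_filter, beq_iff_eq]
    constructor
    · rintro (hm | ⟨q, hq, h1, h2⟩)
      · simp [PySem.Set.empty] at hm
      · exact ⟨q, ⟨hq, h2⟩, h1⟩
    · rintro ⟨q, ⟨hq, h2⟩, h1⟩
      · exact Or.inr ⟨q, hq, h1, h2⟩
  have hbgetD : ∀ c : Int,
      (counts.foldl
        (fun (b : PySem.Dict Int (List (String × Int))) p =>
          (WL.getD p.1 PySem.Set.empty).foldl
            (fun (b : PySem.Dict Int (List (String × Int))) lab => b.modify lab [] (fun l => l ++ [p])) b)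
        PySem.Dict.empty).getD c []
      = counts.filter (fun p => decide (p.1 ∈ CL.getD c [])) := by
    intro c
    rw [bucket_getD (fun w => WL.getD w PySem.Set.empty) hS counts PySem.Dict.empty c]
    rw [PySem.Dict.getD_empty, List.nil_append]
    exact hfc c
  simp only [hbgetD]

-- ===== VERDICT (by name: the statement is the Claim_ definition above) =====
theorem make_json_spec : Claim_equal_make_json := by
  intro word_list counts labels centers _hdom hpre
  unfold Spec_make_json
  rw [a_eq_canon word_list counts labels centers hpre.1 hpre.2.1, b_eq_canon]
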